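-- pv_equiv track=rewrite | github.com/UgiNugi123/Letnik-tasks | teoria_lab3.py | decode_binary_string
-- ===== SOURCE A (Python) =====
-- def decode_binary_string(encoded, codebook):
--     decoded = ''
--     i = 0
--     while i < len(encoded):
--         for j in range(i + 1, len(encoded) + 1):
--             if encoded[i:j] in codebook:
--                 decoded += codebook[encoded[i:j]]
--                 i = j - 1
--                 break
--         i += 1
--     return decoded
-- ===== SOURCE B (Python) =====
-- def decode_binary_string(encoded, codebook):
--     # Bounded scan: only try prefixes up to the longest codeword, built char by
--     # char (no repeated long slices), collecting output pieces and joining once.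
--     max_len = max(map(len, codebook), default=0)
--     n = len(encoded)
--     parts = []
--     i = 0
--     while i < n:
--         step = 1
--         prefix = ''
--         for ch in encoded[i:i + max_len]:
--             prefix += ch
--             if prefix in codebook:
--                 parts.append(codebook[prefix])
--                 step = len(prefix)
--                 break
--         i += step
--     return ''.join(parts)
-- ===== Notes on version B (the rewrite author's own statement) =====
-- stated objective: faster
-- what changed: B bounds the prefix search at each position by the longest codeword length (instead of rescanning slices up to the end of the string), builds each candidate prefix one character at a time, and collects the output pieces in a list joined once at the end.
import Mathlib
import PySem

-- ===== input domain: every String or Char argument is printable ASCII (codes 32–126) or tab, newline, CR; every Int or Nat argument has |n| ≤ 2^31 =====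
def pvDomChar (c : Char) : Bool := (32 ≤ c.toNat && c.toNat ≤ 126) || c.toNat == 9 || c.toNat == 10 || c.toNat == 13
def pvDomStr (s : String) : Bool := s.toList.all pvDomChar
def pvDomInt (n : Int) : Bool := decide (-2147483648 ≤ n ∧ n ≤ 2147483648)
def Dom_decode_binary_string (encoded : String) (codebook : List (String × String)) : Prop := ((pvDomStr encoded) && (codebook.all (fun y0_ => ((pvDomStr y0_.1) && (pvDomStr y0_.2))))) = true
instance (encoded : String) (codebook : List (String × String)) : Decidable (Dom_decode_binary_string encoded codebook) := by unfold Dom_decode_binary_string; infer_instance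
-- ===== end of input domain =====

-- B replaces A's unbounded rescan of ever-longer slices (j up to len(encoded)) by a scan
-- bounded by the longest codeword, building the candidate prefix one character at a time
-- and joining collected pieces once at the end; objective: faster (see claim).

-- ===== PORT A =====
-- inner 'for j in range(i+1, len(encoded)+1): if encoded[i:j] in codebook: … break'
-- returns the dict value and the matching j (the break), or none when the for-loop falls through
def pvAFind (d : PySem.Dict String String) (s : List Char) (i j : Nat) :
    Option (String × Nat) :=
  if _h : j ≤ s.length then
    let sub := String.ofList (PySem.List.slice s (some (i : Int)) (some (j : Int)))
    if d.contains sub then some (d.getD sub "", j)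
    else pvAFind d s i (j + 1)
  else none
  termination_by s.length + 1 - j

-- termination helper for the while loop: a successful inner search returns j' ≥ j
theorem pvAFind_le (d : PySem.Dict String String) (s : List Char) (i j : Nat)
    (v : String) (j' : Nat) (h : pvAFind d s i j = some (v, j')) : j ≤ j' := by
  fun_induction pvAFind d s i j with
  | case1 j hj sub hc => simp_all
  | case2 j hj sub hc ih => exact Nat.le_of_succ_le (ih h)
  | case3 j hj => simp_all

-- while i < len(encoded): on a break at j, Python sets i = j - 1 and then i += 1, i.e. i = j
def pvAWhile (d : PySem.Dict String String) (s : List Char) (i : Nat) (acc : List Char) :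
    List Char :=
  if h : i < s.length then
    match hf : pvAFind d s i (i + 1) with
    | some (v, j) => pvAWhile d s j (acc ++ v.toList)
    | none => pvAWhile d s (i + 1) acc
  else acc
  termination_by s.length - i
  decreasing_by
  · have := pvAFind_le d s i (i + 1) v j hf; omega
  · omega

def decode_binary_string (encoded : String) (codebook : List (String × String)) : String :=
  String.ofList (pvAWhile (PySem.Dict.ofList codebook) encoded.toList 0 [])

-- ===== PORT B =====
-- 'for ch in encoded[i:i+max_len]: prefix += ch; if prefix in codebook: … break'
-- returns the dict value and len(prefix) at the break, or none on fall-through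
def pvBScan (d : PySem.Dict String String) (pre : List Char) : List Char → Option (String × Nat)
  | [] => none
  | c :: cs =>
    let pre' := pre ++ [c]
    if d.contains (String.ofList pre') then some (d.getD (String.ofList pre') "", pre'.length)
    else pvBScan d pre' cs

-- termination helper for the while loop: the step returned by the scan exceeds len(pre)
theorem pvBScan_lt (d : PySem.Dict String String) (pre rest : List Char)
    (v : String) (L : Nat) (h : pvBScan d pre rest = some (v, L)) : pre.length < L := by
  fun_induction pvBScan d pre rest with
  | case1 pre => simp_all
  | case2 pre c cs pre' hc =>
    simp only [Option.some.injEq, Prod.mk.injEq] at h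
    simp only [pre', List.length_append, List.length_cons, List.length_nil] at h
    omega
  | case3 pre c cs pre' hc ih =>
    have := ih h
    simp only [pre', List.length_append, List.length_cons, List.length_nil] at this
    omega

def pvBWhile (d : PySem.Dict String String) (maxL : Nat) (s : List Char) (i : Nat)
    (parts : List String) : List String :=
  if h : i < s.length then
    match hsc : pvBScan d [] (PySem.List.slice s (some (i : Int)) (some ((i : Int) + (maxL : Int)))) with
    | some (v, L) => pvBWhile d maxL s (i + L) (parts ++ [v])
    | none => pvBWhile d maxL s (i + 1) parts
  else parts
  termination_by s.length - i
  decreasing_by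
  · have := pvBScan_lt d [] _ v L hsc; simp at this; omega
  · omega

def decode_binary_string_alt (encoded : String) (codebook : List (String × String)) : String :=
  let d := PySem.Dict.ofList codebook
  -- max(map(len, codebook), default=0): codeword lengths are Nats, so foldl max 0 is exact
  let maxL : Nat := (d.keys.map (fun k => k.toList.length)).foldl max 0
  PySem.Str.join "" (pvBWhile d maxL encoded.toList 0 [])

-- ===== PRECONDITION & SPEC =====
def Spec_decode_binary_string (encoded : String) (codebook : List (String × String)) (out : String) : Prop := out = decode_binary_string_alt encoded codebook
instance (encoded : String) (codebook : List (String × String)) (out : String) : Decidable (Spec_decode_binary_string encoded codebook out) := by unfold Spec_decode_binary_string; infer_instance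

-- ===== CLAIM (what is proved, stated in full; the proofs are below) =====
def Claim_equal_decode_binary_string : Prop := ∀ (encoded : String) (codebook : List (String × String)), Dom_decode_binary_string encoded codebook → Spec_decode_binary_string encoded codebook (decode_binary_string encoded codebook)

-- ===== LEMMAS AND PROOFS =====

-- reference search: first length L' in [L, bound] whose prefix u.take L' is a codebook key
def pvFirstLen (d : PySem.Dict String String) (u : List Char) (L bound : Nat) : Option Nat :=
  if _h : L ≤ bound then
    if d.contains (String.ofList (u.take L)) then some L else pvFirstLen d u (L + 1) bound
  else none
  termination_by bound + 1 - L

-- every key of the codebook has length ≤ B's max_len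
theorem pv_key_len_le (d : PySem.Dict String String) (k : String)
    (hc : d.contains k = true) :
    k.toList.length ≤ (d.keys.map (fun k => k.toList.length)).foldl max 0 := by
  have hk : k ∈ d.keys := (PySem.Dict.contains_iff_mem_keys d k).mp hc
  exact (PySem.List.le_foldl_max _ 0).2 _ (List.mem_map_of_mem hk)

-- A's inner loop computes pvFirstLen with bound n - i
theorem pvAFind_eq (d : PySem.Dict String String) (s : List Char) (i j : Nat) (hij : i < j) :
    pvAFind d s i j = (pvFirstLen d (s.drop i) (j - i) (s.length - i)).map
      (fun L => (d.getD (String.ofList ((s.drop i).take L)) "", i + L)) := by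
  fun_induction pvAFind d s i j with
  | case1 j hj sub hc =>
    rw [pvFirstLen, dif_pos (by omega)]
    simp only [sub, PySem.List.slice_natCast] at hc ⊢
    rw [if_pos hc]
    simp only [Option.map_some]
    have h2 : i + (j - i) = j := by omega
    rw [h2]
  | case2 j hj sub hc ih =>
    rw [pvFirstLen, dif_pos (by omega)]
    simp only [sub, PySem.List.slice_natCast] at hc
    rw [if_neg hc, ih (by omega)]
    have h2 : j + 1 - i = j - i + 1 := by omega
    rw [h2]
  | case3 j hj =>
    rw [pvFirstLen, dif_neg (by omega)]
    simp

-- B's scan over the bounded slice computes pvFirstLen with bound m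
theorem pvBScan_eq (d : PySem.Dict String String) (u : List Char) (m t : Nat)
    (hm : m ≤ u.length) (ht : t ≤ m) :
    pvBScan d ((u.take m).take t) ((u.take m).drop t) =
      (pvFirstLen d u (t + 1) m).map
        (fun L => (d.getD (String.ofList (u.take L)) "", L)) := by
  by_cases hlt : t < m
  · have hlen : (u.take m).length = m := by simp; omega
    have hdrop : (u.take m).drop t = (u.take m)[t] :: (u.take m).drop (t + 1) :=
      List.drop_eq_getElem_cons (by simp; omega)
    rw [hdrop, pvBScan]
    have hcat : (u.take m).take t ++ [(u.take m)[t]] = (u.take m).take (t + 1) := by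
      rw [← List.take_concat_get']
    have htake : ∀ L, L ≤ m → (u.take m).take L = u.take L := by
      intro L hL
      rw [List.take_take]
      congr 1
      omega
    rw [pvFirstLen, dif_pos (by omega)]
    simp only [hcat, htake (t + 1) (by omega)]
    by_cases hc : d.contains (String.ofList (u.take (t + 1))) = true
    · rw [if_pos hc, if_pos hc]
      simp only [Option.map_some]
      congr 2
      have : (u.take (t + 1)).length = t + 1 := by simp; omega
      rw [htake (t + 1) (by omega)] at *
      omega
    · rw [if_neg hc, if_neg hc]
      have := pvBScan_eq d u m (t + 1) hm (by omega)
      rw [htake (t + 1) (by omega)] at this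
      exact this
  · have hteq : t = m := by omega
    subst hteq
    rw [List.drop_of_length_le (by simp), pvBScan, pvFirstLen, dif_neg (by omega)]
    simp
  termination_by m - t

theorem pvFirstLen_ge (d : PySem.Dict String String) (u : List Char) (L bound L' : Nat)
    (h : pvFirstLen d u L bound = some L') : L ≤ L' ∧ L' ≤ bound := by
  fun_induction pvFirstLen d u L bound with
  | case1 L hb hc => simp_all
  | case2 L hb hc ih => have := ih h; omega
  | case3 L hb => simp_all

-- bounding the search by the longest key loses nothing
theorem pvFirstLen_bound (d : PySem.Dict String String) (u : List Char) (L : Nat)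
    (maxL : Nat) (hkey : ∀ k, d.contains k = true → k.toList.length ≤ maxL) :
    pvFirstLen d u L (min maxL u.length) = pvFirstLen d u L u.length := by
  by_cases h1 : L ≤ min maxL u.length
  · conv_lhs => rw [pvFirstLen]
    conv_rhs => rw [pvFirstLen]
    rw [dif_pos h1, dif_pos (by omega)]
    by_cases hc : d.contains (String.ofList (u.take L)) = true
    · rw [if_pos hc, if_pos hc]
    · rw [if_neg hc, if_neg hc]
      exact pvFirstLen_bound d u (L + 1) maxL hkey
  · conv_lhs => rw [pvFirstLen]
    rw [dif_neg h1]
    by_cases h2 : L ≤ u.length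
    · have hc : ¬ d.contains (String.ofList (u.take L)) = true := by
        intro hc
        have := hkey _ hc
        simp at this
        omega
      have hrec := pvFirstLen_bound d u (L + 1) maxL hkey
      conv_rhs => rw [pvFirstLen]
      rw [dif_pos h2, if_neg hc, ← hrec, pvFirstLen, dif_neg (by omega)]
    · conv_rhs => rw [pvFirstLen]
      rw [dif_neg h2]
  termination_by u.length + 1 - L

-- unfolding lemmas for the two while loops (their matches carry an equation binder
-- for termination, so we case once here and use these everywhere below)
theorem pvAWhile_some (d : PySem.Dict String String) (s : List Char) (i : Nat)
    (acc : List Char) (v : String) (j : Nat) (h : i < s.length)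
    (hf : pvAFind d s i (i + 1) = some (v, j)) :
    pvAWhile d s i acc = pvAWhile d s j (acc ++ v.toList) := by
  rw [pvAWhile.eq_def, dif_pos h]
  split
  · next v' j' heq =>
    rw [hf] at heq
    injection heq with heq2
    injection heq2 with h1 h2
    rw [h1, h2]
  · next heq => rw [hf] at heq; cases heq

theorem pvAWhile_none (d : PySem.Dict String String) (s : List Char) (i : Nat)
    (acc : List Char) (h : i < s.length)
    (hf : pvAFind d s i (i + 1) = none) :
    pvAWhile d s i acc = pvAWhile d s (i + 1) acc := by
  rw [pvAWhile.eq_def, dif_pos h]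
  split
  · next v' j' heq => rw [hf] at heq; cases heq
  · next heq => rfl

theorem pvAWhile_base (d : PySem.Dict String String) (s : List Char) (i : Nat)
    (acc : List Char) (h : ¬ i < s.length) :
    pvAWhile d s i acc = acc := by
  rw [pvAWhile.eq_def, dif_neg h]

theorem pvBWhile_some (d : PySem.Dict String String) (maxL : Nat) (s : List Char) (i : Nat)
    (parts : List String) (v : String) (L : Nat) (h : i < s.length)
    (hsc : pvBScan d [] (PySem.List.slice s (some (i : Int)) (some ((i : Int) + (maxL : Int)))) = some (v, L)) :
    pvBWhile d maxL s i parts = pvBWhile d maxL s (i + L) (parts ++ [v]) := by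
  rw [pvBWhile.eq_def, dif_pos h]
  split
  · next v' L' heq =>
    rw [hsc] at heq
    injection heq with heq2
    injection heq2 with h1 h2
    rw [h1, h2]
  · next heq => rw [hsc] at heq; cases heq

theorem pvBWhile_none (d : PySem.Dict String String) (maxL : Nat) (s : List Char) (i : Nat)
    (parts : List String) (h : i < s.length)
    (hsc : pvBScan d [] (PySem.List.slice s (some (i : Int)) (some ((i : Int) + (maxL : Int)))) = none) :
    pvBWhile d maxL s i parts = pvBWhile d maxL s (i + 1) parts := by
  rw [pvBWhile.eq_def, dif_pos h]
  split
  · next v' L' heq => rw [hsc] at heq; cases heq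
  · next heq => rfl

theorem pvBWhile_base (d : PySem.Dict String String) (maxL : Nat) (s : List Char) (i : Nat)
    (parts : List String) (h : ¬ i < s.length) :
    pvBWhile d maxL s i parts = parts := by
  rw [pvBWhile.eq_def, dif_neg h]

-- B's while loop only appends to its accumulator
theorem pvBWhile_acc (d : PySem.Dict String String) (maxL : Nat) (s : List Char) (i : Nat)
    (parts : List String) :
    pvBWhile d maxL s i parts = parts ++ pvBWhile d maxL s i [] := by
  by_cases h : i < s.length
  · cases hsc : pvBScan d [] (PySem.List.slice s (some (i : Int)) (some ((i : Int) + (maxL : Int)))) with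
    | none =>
      rw [pvBWhile_none d maxL s i parts h hsc, pvBWhile_none d maxL s i [] h hsc]
      exact pvBWhile_acc d maxL s (i + 1) parts
    | some p =>
      obtain ⟨v, L⟩ := p
      have hL : 0 < L := by simpa using pvBScan_lt d [] _ v L hsc
      rw [pvBWhile_some d maxL s i parts v L h hsc, pvBWhile_some d maxL s i [] v L h hsc,
          pvBWhile_acc d maxL s (i + L) (parts ++ [v]),
          pvBWhile_acc d maxL s (i + L) ([] ++ [v])]
      simp
  · rw [pvBWhile_base d maxL s i parts h, pvBWhile_base d maxL s i [] h]
    simp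
  termination_by s.length - i
  decreasing_by
  · omega
  · omega
  · omega

-- the two while loops produce the same characters
theorem pv_loops_eq (d : PySem.Dict String String) (maxL : Nat) (s : List Char) (i : Nat)
    (acc : List Char)
    (hkey : ∀ k, d.contains k = true → k.toList.length ≤ maxL) :
    pvAWhile d s i acc = acc ++ ((pvBWhile d maxL s i []).map String.toList).flatten := by
  by_cases h : i < s.length
  · have hu : (s.drop i).length = s.length - i := by simp
    have hslice : PySem.List.slice s (some (i : Int)) (some ((i : Int) + (maxL : Int))) =
        (s.drop i).take (min maxL (s.length - i)) := by
      rw [PySem.List.slice_natCast_add]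
      rcases Nat.le_total maxL (s.drop i).length with hle | hle
      · congr 1
        omega
      · rw [List.take_of_length_le hle, List.take_of_length_le (by simp; omega)]
    have hB : pvBScan d [] (PySem.List.slice s (some (i : Int)) (some ((i : Int) + (maxL : Int)))) =
        (pvFirstLen d (s.drop i) 1 (s.length - i)).map
          (fun L => (d.getD (String.ofList ((s.drop i).take L)) "", L)) := by
      rw [hslice]
      have := pvBScan_eq d (s.drop i) (min maxL (s.length - i)) 0 (by omega) (by omega)
      simp only [List.take_zero, List.drop_zero, Nat.zero_add] at this
      rw [this]
      have hm : min maxL (s.length - i) = min maxL (s.drop i).length := by omega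
      rw [hm, pvFirstLen_bound d (s.drop i) 1 maxL hkey, hu]
    have hA := pvAFind_eq d s i (i + 1) (by omega)
    have h1 : i + 1 - i = 1 := by omega
    rw [h1] at hA
    cases hfl : pvFirstLen d (s.drop i) 1 (s.length - i) with
    | none =>
      have hA' : pvAFind d s i (i + 1) = none := by rw [hA, hfl]; rfl
      have hB' : pvBScan d [] (PySem.List.slice s (some (i : Int)) (some ((i : Int) + (maxL : Int)))) = none := by
        rw [hB, hfl]; rfl
      rw [pvAWhile_none d s i acc h hA', pvBWhile_none d maxL s i [] h hB']
      exact pv_loops_eq d maxL s (i + 1) acc hkey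
    | some L =>
      have hA' : pvAFind d s i (i + 1) =
          some (d.getD (String.ofList ((s.drop i).take L)) "", i + L) := by
        rw [hA, hfl]; rfl
      have hB' : pvBScan d [] (PySem.List.slice s (some (i : Int)) (some ((i : Int) + (maxL : Int)))) =
          some (d.getD (String.ofList ((s.drop i).take L)) "", L) := by
        rw [hB, hfl]; rfl
      have hL : 1 ≤ L := (pvFirstLen_ge d (s.drop i) 1 (s.length - i) L hfl).1
      rw [pvAWhile_some d s i acc _ (i + L) h hA',
          pvBWhile_some d maxL s i [] _ L h hB',
          pv_loops_eq d maxL s (i + L)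
            (acc ++ (d.getD (String.ofList ((s.drop i).take L)) "").toList) hkey,
          pvBWhile_acc d maxL s (i + L) ([] ++ [d.getD (String.ofList ((s.drop i).take L)) ""])]
      simp
  · rw [pvAWhile_base d s i acc h, pvBWhile_base d maxL s i [] h]
    simp
  termination_by s.length - i
  decreasing_by
  · omega
  · omega

-- ''.join is flatten
theorem pv_join_empty (parts : List String) :
    PySem.Str.join "" parts = String.ofList ((parts.map String.toList)).flatten := by
  have h1 : (PySem.Str.join "" parts).toList = (parts.map String.toList).flatten := by
    rw [PySem.Str.toList_join]
    have he : ("" : String).toList = [] := rfl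
    rw [he]
    show List.intercalate [] _ = _
    generalize (parts.map String.toList) = ps
    simp [List.intercalate]
    induction ps with
    | nil => simp
    | cons p qs ih => cases qs <;> simp_all [List.intersperse]
  apply String.toList_inj.mp
  rw [h1]
  simp

-- ===== VERDICT (by name: the statement is the Claim_ definition above) =====
theorem decode_binary_string_spec : Claim_equal_decode_binary_string := by
  intro encoded codebook _
  unfold Spec_decode_binary_string decode_binary_string decode_binary_string_alt
  rw [pv_join_empty, pv_loops_eq _ _ _ _ _ (fun k hk => pv_key_len_le _ k hk)]
  simp
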